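-- pv_equiv track=rewrite | github.com/Yangangren/ReDAT | multi_evaluation_podar/map.py | repeat_delete
-- ===== SOURCE A (Python) =====
-- def repeat_delete(LPstpara):
--     '''对标准化后数据集中的连续直线进行合并处理'''
--     i = 0  # 如果真的是绝对直线连接，合并一下
--     while i < len(LPstpara):
--         if LPstpara[i][1] == 1:
--             j = i
--             while j + 1 < len(LPstpara) and LPstpara[j + 1][1] == 1:
--                 del LPstpara[i]
--         i += 1
--     return LPstpara
-- ===== SOURCE B (Python) =====
-- def repeat_delete(LPstpara):
--     '''Single zip pass: drop an entry when both it and its successor have flag 1.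
--     (Returns a new list; A mutates its argument in place.)'''
--     out = [cur for cur, nxt in zip(LPstpara, LPstpara[1:])
--            if not (cur[1] == 1 and nxt[1] == 1)]
--     out.extend(LPstpara[-1:])
--     return out
-- ===== Notes on version B (the rewrite author's own statement) =====
-- stated objective: simpler
-- what changed: Replaced the in-place while/del rescanning loop by a single non-mutating zip pass that keeps an entry unless it and its successor both have flag 1.
import Mathlib
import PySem

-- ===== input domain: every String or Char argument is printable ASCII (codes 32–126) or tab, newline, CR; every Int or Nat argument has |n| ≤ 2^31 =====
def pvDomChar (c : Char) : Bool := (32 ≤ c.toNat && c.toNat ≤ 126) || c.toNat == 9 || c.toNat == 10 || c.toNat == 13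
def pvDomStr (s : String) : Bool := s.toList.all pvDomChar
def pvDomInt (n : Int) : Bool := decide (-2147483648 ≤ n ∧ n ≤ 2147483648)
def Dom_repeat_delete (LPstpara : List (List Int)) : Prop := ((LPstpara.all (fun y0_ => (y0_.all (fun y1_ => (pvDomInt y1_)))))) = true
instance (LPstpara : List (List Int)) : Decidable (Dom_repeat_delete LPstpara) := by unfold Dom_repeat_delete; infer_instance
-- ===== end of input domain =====

-- B rebuilds the list in one non-mutating zip pass instead of A's in-place while/del loop; equivalence is about the RETURN value only (A mutates its argument).

-- ===== PORT A =====
-- L[k][1] for a Nat index k (the loop indices are always ≥ 0); default 0/[] is unreachable under Pre_.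
def flagA (L : List (List Int)) (k : Nat) : Int := (L[k]?.getD [])[1]?.getD 0

-- inner 'while j + 1 < len(LPstpara) and LPstpara[j+1][1] == 1: del LPstpara[i]'  (j stays equal to i)
def rdInner (fuel : Nat) (L : List (List Int)) (i : Nat) : List (List Int) :=
  match fuel with
  | 0 => L
  | f + 1 =>
    if i + 1 < L.length ∧ flagA L (i + 1) = 1 then rdInner f (L.eraseIdx i) i else L

-- outer 'while i < len(LPstpara): if LPstpara[i][1] == 1: …inner…; i += 1'
def rdOuter (fuel : Nat) (L : List (List Int)) (i : Nat) : List (List Int) :=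
  match fuel with
  | 0 => L
  | f + 1 =>
    if i < L.length then
      let L' := if flagA L i = 1 then rdInner L.length L i else L
      rdOuter f L' (i + 1)
    else L

def repeat_delete (LPstpara : List (List Int)) : List (List Int) :=
  rdOuter LPstpara.length LPstpara 0

-- ===== PORT B =====
def flagB (l : List Int) : Int := l[1]?.getD 0

def repeat_delete_alt (LPstpara : List (List Int)) : List (List Int) :=
  ((LPstpara.zip LPstpara.tail).filterMap
      (fun p => if flagB p.1 = 1 ∧ flagB p.2 = 1 then none else some p.1))
    ++ PySem.List.slice LPstpara (some (-1)) none

-- ===== PRECONDITION & SPEC =====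
-- Pre_ excludes exactly the inputs on which Python A raises IndexError: some entry shorter than 2.
def Pre_repeat_delete (LPstpara : List (List Int)) : Prop :=
  ∀ l ∈ LPstpara, 2 ≤ l.length
instance (LPstpara : List (List Int)) : Decidable (Pre_repeat_delete LPstpara) := by
  unfold Pre_repeat_delete; infer_instance

def pvWitness_repeat_delete : List (List Int) := [[0, 1], [3, 1], [4, 0], [5, 1]]

def Spec_repeat_delete (LPstpara : List (List Int)) (out : List (List Int)) : Prop := out = repeat_delete_alt LPstpara
instance (LPstpara : List (List Int)) (out : List (List Int)) : Decidable (Spec_repeat_delete LPstpara out) := by unfold Spec_repeat_delete; infer_instance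

-- ===== CLAIM (what is proved, stated in full; the proofs are below) =====
def Claim_equal_repeat_delete : Prop := ∀ (LPstpara : List (List Int)), Dom_repeat_delete LPstpara → Pre_repeat_delete LPstpara → Spec_repeat_delete LPstpara (repeat_delete LPstpara)

-- ===== LEMMAS AND PROOFS =====

-- reference recursion both ports are reduced to
def gRD : List (List Int) → List (List Int)
  | [] => []
  | [a] => [a]
  | a :: b :: rest =>
    if flagB a = 1 ∧ flagB b = 1 then gRD (b :: rest) else a :: gRD (b :: rest)

-- result of the inner while loop on the suffix starting at i
def lastRun : List (List Int) → List (List Int)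
  | a :: b :: rest => if flagB b = 1 then lastRun (b :: rest) else a :: b :: rest
  | xs => xs

theorem flagA_append (pre xs : List (List Int)) (k : Nat) :
    flagA (pre ++ xs) (pre.length + k) = flagA xs k := by
  simp [flagA, List.getElem?_append_right]

theorem length_lastRun_le (xs : List (List Int)) : (lastRun xs).length ≤ xs.length := by
  induction xs with
  | nil => simp [lastRun]
  | cons a t ih =>
    cases t with
    | nil => simp [lastRun]
    | cons b rest =>
      simp only [lastRun]
      split
      · exact le_trans ih (by simp)
      · simp

theorem lastRun_ne_nil (xs : List (List Int)) (h : xs ≠ []) : lastRun xs ≠ [] := by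
  induction xs with
  | nil => exact absurd rfl h
  | cons a t ih =>
    cases t with
    | nil => simp [lastRun]
    | cons b rest =>
      simp only [lastRun]
      split
      · exact ih (by simp)
      · simp

theorem rdInner_spec (pre xs : List (List Int)) (fuel : Nat) (hf : xs.length ≤ fuel) :
    rdInner fuel (pre ++ xs) pre.length = pre ++ lastRun xs := by
  induction xs generalizing fuel with
  | nil =>
    cases fuel with
    | zero => simp [rdInner, lastRun]
    | succ f => simp [rdInner, lastRun]
  | cons a t ih =>
    cases fuel with
    | zero => simp at hf
    | succ f =>
      cases t with
      | nil =>
        simp [rdInner, lastRun]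
      | cons b rest =>
        have hflag : flagA (pre ++ a :: b :: rest) (pre.length + 1) = flagB b := by
          rw [flagA_append]
          simp [flagA, flagB]
        by_cases hb : flagB b = 1
        · have hcond : pre.length + 1 < (pre ++ a :: b :: rest).length ∧
              flagA (pre ++ a :: b :: rest) (pre.length + 1) = 1 :=
            ⟨by simp, by rw [hflag]; exact hb⟩
          have herase : (pre ++ a :: b :: rest).eraseIdx pre.length = pre ++ b :: rest := by
            rw [List.eraseIdx_append_of_length_le (le_refl _)]
            simp
          simp only [rdInner, if_pos hcond, herase]
          rw [ih f (by simp at hf ⊢; omega)]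
          simp [lastRun, hb]
        · have hcond : ¬ (pre.length + 1 < (pre ++ a :: b :: rest).length ∧
              flagA (pre ++ a :: b :: rest) (pre.length + 1) = 1) := by
            rw [hflag]; tauto
          simp only [rdInner, if_neg hcond]
          simp [lastRun, hb]

-- head of lastRun keeps flag 1 when the run started with flag 1; tail's head has flag ≠ 1
theorem gRD_lastRun (xs : List (List Int)) (hx : xs ≠ []) (h1 : flagB (xs.headI) = 1) :
    gRD xs = (lastRun xs).headI :: gRD (lastRun xs).tail := by
  induction xs with
  | nil => exact absurd rfl hx
  | cons a t ih =>
    cases t with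
    | nil => simp [gRD, lastRun]
    | cons b rest =>
      simp only [List.headI] at h1
      by_cases hb : flagB b = 1
      · simp only [gRD, lastRun, hb, h1, and_self, if_pos]
        exact ih (by simp) hb
      · simp only [gRD, lastRun, if_neg hb, if_neg (by tauto : ¬ (flagB a = 1 ∧ flagB b = 1))]
        simp [List.headI, List.tail]

theorem rdOuter_spec_aux (n : Nat) (pre xs : List (List Int)) (fuel : Nat)
    (hn : xs.length ≤ n) (hf : xs.length ≤ fuel) :
    rdOuter fuel (pre ++ xs) pre.length = pre ++ gRD xs := by
  induction n generalizing pre xs fuel with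
  | zero =>
    have : xs = [] := by cases xs <;> simp_all
    subst this
    cases fuel with
    | zero => simp [rdOuter, gRD]
    | succ f => simp [rdOuter, gRD]
  | succ m ih =>
  cases xs with
  | nil =>
    cases fuel with
    | zero => simp [rdOuter, gRD]
    | succ f => simp [rdOuter, gRD]
  | cons a t =>
    cases fuel with
    | zero => simp at hf
    | succ f =>
      have hlt : pre.length < (pre ++ a :: t).length := by simp
      have hfa : flagA (pre ++ a :: t) pre.length = flagB a := by
        simp [flagA, flagB, List.getElem?_append_right]
      by_cases ha : flagB a = 1
      · -- inner loop runs: list becomes pre ++ lastRun (a :: t)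
        have hinner : rdInner (pre ++ a :: t).length (pre ++ a :: t) pre.length
            = pre ++ lastRun (a :: t) := rdInner_spec pre (a :: t) _ (by simp)
        simp only [rdOuter, if_pos hlt, hfa, if_pos ha, hinner]
        -- lastRun (a :: t) = c :: rest'
        have hne : lastRun (a :: t) ≠ [] := lastRun_ne_nil _ (by simp)
        obtain ⟨c, rest', hcr⟩ : ∃ c rest', lastRun (a :: t) = c :: rest' := by
          cases hh : lastRun (a :: t) with
          | nil => exact absurd hh hne
          | cons c r => exact ⟨c, r, rfl⟩
        have hlen : (c :: rest').length ≤ (a :: t).length := by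
          rw [← hcr]; exact length_lastRun_le _
        have hstep : pre ++ c :: rest' = (pre ++ [c]) ++ rest' := by simp
        rw [hcr, hstep]
        have : rdOuter f ((pre ++ [c]) ++ rest') (pre.length + 1) = (pre ++ [c]) ++ gRD rest' := by
          have hlenpre : (pre ++ [c]).length = pre.length + 1 := by simp
          rw [← hlenpre]
          exact ih _ rest' _ (by simp at hn hlen ⊢; omega) (by simp at hf hlen ⊢; omega)
        rw [this]
        have hg : gRD (a :: t) = c :: gRD rest' := by
          have := gRD_lastRun (a :: t) (by simp) (by simpa [List.headI] using ha)
          rw [hcr] at this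
          simpa using this
        rw [hg]; simp
      · -- flag ≠ 1: list unchanged, step to i+1
        simp only [rdOuter, if_pos hlt, hfa, if_neg ha]
        have hstep : pre ++ a :: t = (pre ++ [a]) ++ t := by simp
        rw [hstep]
        have : rdOuter f ((pre ++ [a]) ++ t) (pre.length + 1) = (pre ++ [a]) ++ gRD t := by
          have hlenpre : (pre ++ [a]).length = pre.length + 1 := by simp
          rw [← hlenpre]
          exact ih _ t _ (by simp at hn ⊢; omega) (by simp at hf ⊢; omega)
        rw [this]
        have hg : gRD (a :: t) = a :: gRD t := by
          cases t with
          | nil => simp [gRD]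
          | cons b r => simp only [gRD]; rw [if_neg (by tauto)]
        rw [hg]; simp

theorem alt_eq_gRD (L : List (List Int)) : repeat_delete_alt L = gRD L := by
  induction L with
  | nil => simp [repeat_delete_alt, gRD, PySem.List.slice_from_neg_one]
  | cons a t ih =>
    cases t with
    | nil =>
      simp [repeat_delete_alt, gRD, PySem.List.slice_from_neg_one]
    | cons b rest =>
      have hslice : ∀ (M : List (List Int)), M ≠ [] →
          PySem.List.slice (a :: M) (some (-1)) none = PySem.List.slice M (some (-1)) none := by
        intro M hM
        rw [PySem.List.slice_from_neg_one, PySem.List.slice_from_neg_one]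
        cases M with
        | nil => exact absurd rfl hM
        | cons m ms => simp
      simp only [repeat_delete_alt, List.tail, List.zip, List.zipWith, List.filterMap] at ih ⊢
      rw [hslice (b :: rest) (by simp)]
      by_cases h : flagB a = 1 ∧ flagB b = 1
      · simp only [gRD, if_pos h]
        exact ih
      · simp only [gRD, if_neg h]
        simpa using ih

-- ===== VERDICT (by name: the statement is the Claim_ definition above) =====
theorem repeat_delete_spec : Claim_equal_repeat_delete := by
  intro L _ _
  unfold Spec_repeat_delete repeat_delete
  have := rdOuter_spec_aux L.length [] L L.length (le_refl _) (le_refl _)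
  simpa [alt_eq_gRD] using this
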